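-- pv_equiv track=rewrite | github.com/aviswerdlow/k4 | 05_ARCHIVE/05_ARCHIVE/experiments/pipeline_v5_1/scripts/run_context_gate_mock.py | count_function_words
-- ===== SOURCE A (Python) =====
-- def count_function_words(text: str) -> int:
--     """Count function words in text."""
--     function_words = {
--         'the', 'and', 'a', 'an', 'then', 'that', 'this', 'these', 'those',
--         'is', 'are', 'was', 'were', 'be', 'been', 'being',
--         'have', 'has', 'had', 'do', 'does', 'did',
--         'will', 'would', 'could', 'should', 'may', 'might', 'must',
--         'shall', 'can', 'need', 'ought', 'used', 'to', 'of', 'in', 'on',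
--         'at', 'by', 'for', 'with', 'from', 'up', 'about', 'into', 'through',
--         'during', 'before', 'after', 'above', 'below', 'between', 'under',
--         'but', 'or', 'if', 'because', 'as', 'until', 'while', 'since'
--     }
--
--     words = text.lower().split()
--     return sum(1 for w in words if w in function_words)
-- ===== SOURCE B (Python) =====
-- def count_function_words(text: str) -> int:
--     """Count function words in text."""
--     fw = ("the and a an then that this these those is are was were be been being "
--           "have has had do does did will would could should may might must "
--           "shall can need ought used to of in on at by for with from up about "
--           "into through during before after above below between under "
--           "but or if because as until while since").split()
--     words = text.lower().split()
--     return sum(words.count(w) for w in fw)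
-- ===== Notes on version B (the rewrite author's own statement) =====
-- stated objective: alternative
-- what changed: B inverts the traversal: it loops over the fixed function-word list (kept as one space-separated string split at runtime) and sums each word's multiplicity in the token list, instead of scanning every token and testing set membership.
import Mathlib
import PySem

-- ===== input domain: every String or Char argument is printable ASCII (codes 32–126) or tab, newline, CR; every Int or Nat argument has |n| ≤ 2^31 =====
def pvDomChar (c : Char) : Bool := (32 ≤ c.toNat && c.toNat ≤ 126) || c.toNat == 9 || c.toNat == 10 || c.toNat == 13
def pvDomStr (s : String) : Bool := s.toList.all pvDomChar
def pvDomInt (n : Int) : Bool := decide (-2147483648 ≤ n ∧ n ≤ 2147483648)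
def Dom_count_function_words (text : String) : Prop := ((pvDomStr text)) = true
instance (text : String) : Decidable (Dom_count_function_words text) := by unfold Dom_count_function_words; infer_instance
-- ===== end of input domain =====

-- B inverts the traversal: it sums each fixed function word's multiplicity in the token list
-- instead of scanning tokens with a membership test; alternative structure, same result.

-- ===== PORT A =====
-- function_words = {...}; words = text.lower().split(); sum(1 for w in words if w in function_words)
def pvFunctionWordsA : List String :=
  ["the", "and", "a", "an", "then", "that", "this", "these", "those",
   "is", "are", "was", "were", "be", "been", "being",
   "have", "has", "had", "do", "does", "did",
   "will", "would", "could", "should", "may", "might", "must",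
   "shall", "can", "need", "ought", "used", "to", "of", "in", "on",
   "at", "by", "for", "with", "from", "up", "about", "into", "through",
   "during", "before", "after", "above", "below", "between", "under",
   "but", "or", "if", "because", "as", "until", "while", "since"]

def count_function_words (text : String) : Int :=
  let words := PySem.Str.split₀ (PySem.Str.lower text)
  ((words.countP (fun w => pvFunctionWordsA.contains w) : Nat) : Int)

-- ===== PORT B =====
-- fw = "the and ...".split(); words = text.lower().split(); sum(words.count(w) for w in fw)
def count_function_words_alt (text : String) : Int :=
  let fw := PySem.Str.split₀
    ("the and a an then that this these those is are was were be been being \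
      have has had do does did will would could should may might must \
      shall can need ought used to of in on at by for with from up about \
      into through during before after above below between under \
      but or if because as until while since")
  let words := PySem.Str.split₀ (PySem.Str.lower text)
  (fw.map (fun w => ((words.count w : Nat) : Int))).sum

-- ===== PRECONDITION & SPEC =====
def Spec_count_function_words (text : String) (out : Int) : Prop := out = count_function_words_alt text
instance (text : String) (out : Int) : Decidable (Spec_count_function_words text out) := by unfold Spec_count_function_words; infer_instance

-- ===== CLAIM (what is proved, stated in full; the proofs are below) =====
def Claim_equal_count_function_words : Prop := ∀ (text : String), Dom_count_function_words text → Spec_count_function_words text (count_function_words text)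

-- ===== LEMMAS AND PROOFS =====

-- counting tokens that hit f-or-rest splits into count of f plus the rest, when f is not in rest
theorem pv_countP_cons {α : Type} [DecidableEq α] (f : α) (rest : List α) (hf : f ∉ rest)
    (words : List α) :
    words.countP (fun w => decide (w ∈ f :: rest))
      = words.count f + words.countP (fun w => decide (w ∈ rest)) := by
  induction words with
  | nil => simp
  | cons w ws ih =>
    rw [List.countP_cons, List.countP_cons, List.count_cons, ih]
    by_cases h : w = f
    · subst h; simp [hf]; omega
    · by_cases h2 : w ∈ rest <;> simp [h, h2]
      omega

-- the membership-count over words equals the sum of per-word multiplicities over a duplicate-free word list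
theorem pv_countP_eq_sum {α : Type} [DecidableEq α] (fws : List α) (hnd : fws.Nodup)
    (words : List α) :
    ((words.countP (fun w => decide (w ∈ fws)) : Nat) : Int)
      = (fws.map (fun w => ((words.count w : Nat) : Int))).sum := by
  induction fws with
  | nil => simp
  | cons f rest ih =>
    rcases List.nodup_cons.mp hnd with ⟨hf, hrest⟩
    rw [pv_countP_cons f rest hf words]
    push_cast
    rw [List.map_cons, List.sum_cons, ih hrest]

-- B's runtime split of the single string literal yields exactly A's word list
set_option maxRecDepth 100000 in
theorem pv_fw_split :
    PySem.Str.split₀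
    ("the and a an then that this these those is are was were be been being \
      have has had do does did will would could should may might must \
      shall can need ought used to of in on at by for with from up about \
      into through during before after above below between under \
      but or if because as until while since") = pvFunctionWordsA := by
  decide

-- ===== VERDICT (by name: the statement is the Claim_ definition above) =====
theorem count_function_words_spec : Claim_equal_count_function_words := by
  intro text _
  unfold Spec_count_function_words count_function_words count_function_words_alt
  rw [pv_fw_split]
  have hpred : (fun w => pvFunctionWordsA.contains w)
      = (fun w => decide (w ∈ pvFunctionWordsA)) := by
    funext w; simp
  have hnd : pvFunctionWordsA.Nodup := by decide
  rw [hpred, pv_countP_eq_sum pvFunctionWordsA hnd]
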